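-- pv_equiv track=rewrite | github.com/letovesnoi/Bioinformatics_Algorithms | lesson4/LRepeatW1M.py | LongestRepeatWith1Mismath
-- ===== SOURCE A (Python) =====
-- def LongestRepeatWith1Mismath(seq):
--     repeats = []
--     ans = {'i': 0, 'j': 0, 'l': 0}
--     for shift in range(1, len(seq)):
--         start = 0
--         stop = len(seq) - shift
--         errors = 0
--         current = start
--         for i in range(start, stop, 1):
--             while current < stop and (errors < 1 or seq[current] == seq[current + shift]):
--                 if seq[current] != seq[current + shift]:
--                     errors += 1
--                 current += 1
--             if current - i > ans['l'] and i != i + shift and i + current - i - 1 < i + shift: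
--                 ans['i'] = i
--                 ans['j'] = i + shift
--                 ans['l'] = current - i
--             if seq[i] != seq[i + shift]:
--                 errors -= 1
--     repeats.append(seq[ans['i']:ans['i'] + ans['l']])
--     repeats.append(seq[ans['j']:ans['j'] + ans['l']])
--     return repeats
-- ===== SOURCE B (Python) =====
-- def LongestRepeatWith1Mismath(seq):
--     n = len(seq)
--     bi = bj = bl = 0
--     for shift in range(1, n):
--         stop = n - shift
--         for i in range(stop):
--             cur = i
--             err = 0
--             while cur < stop and (err < 1 or seq[cur] == seq[cur + shift]):
--                 if seq[cur] != seq[cur + shift]: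
--                     err += 1
--                 cur += 1
--             l = cur - i
--             if l > bl and l <= shift:
--                 bi, bj, bl = i, i + shift, l
--     return [seq[bi:bi + bl], seq[bj:bj + bl]]
-- ===== Notes on version B (the rewrite author's own statement) =====
-- stated objective: simpler
-- what changed: Replaces the amortized sliding window (persistent current/errors state with the error-decrement on window shift, and the redundant i != i+shift / i + current - i - 1 index algebra) by an independent fresh two-pointer extension from each start i with a local mismatch counter and the plain guards l > best and l <= shift.
import Mathlib
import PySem

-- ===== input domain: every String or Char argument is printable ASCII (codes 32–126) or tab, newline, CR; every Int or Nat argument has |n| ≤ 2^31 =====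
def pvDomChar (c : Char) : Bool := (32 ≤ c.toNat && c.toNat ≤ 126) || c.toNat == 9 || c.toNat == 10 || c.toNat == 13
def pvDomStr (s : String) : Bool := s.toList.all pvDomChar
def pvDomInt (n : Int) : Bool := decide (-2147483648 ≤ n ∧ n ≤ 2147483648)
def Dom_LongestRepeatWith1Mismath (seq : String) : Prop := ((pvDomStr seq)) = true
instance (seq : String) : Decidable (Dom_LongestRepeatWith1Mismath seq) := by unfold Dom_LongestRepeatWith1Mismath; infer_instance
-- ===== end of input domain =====

-- B replaces A's amortized sliding window (persistent current/errors state) by an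
-- independent fresh two-pointer extension from each start; objective: simpler.

-- ===== PORT A =====
-- A's inner `while` loop: slides `current` forward, maintaining the running `errors` count.
def aWhile (l : List Char) (shift stop cur : Nat) (errors : Int) : Nat × Int :=
  if _h : cur < stop then
    if errors < 1 ∨ l.getD cur ' ' = l.getD (cur + shift) ' ' then
      aWhile l shift stop (cur + 1)
        (if l.getD cur ' ' ≠ l.getD (cur + shift) ' ' then errors + 1 else errors)
    else (cur, errors)
  else (cur, errors)
termination_by stop - cur

-- A's body for one `i` of the inner `for` loop: state = ((current, errors), ans) with ans = (i, j, l).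
def aBody (l : List Char) (shift stop : Nat) (s : (Nat × Int) × (Nat × Nat × Nat)) (i : Nat) :
    (Nat × Int) × (Nat × Nat × Nat) :=
  let r := aWhile l shift stop s.1.1 s.1.2
  let ans := s.2
  let ans' :=
    if (r.1 : Int) - i > (ans.2.2 : Int) ∧ i ≠ i + shift ∧
        (i : Int) + ((r.1 : Int) - i) - 1 < (i : Int) + shift then
      (i, i + shift, r.1 - i)
    else ans
  let e' := if l.getD i ' ' ≠ l.getD (i + shift) ' ' then r.2 - 1 else r.2
  ((r.1, e'), ans')

def LongestRepeatWith1Mismath (seq : String) : List String :=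
  let l := seq.toList
  let ans := (List.range' 1 (l.length - 1)).foldl
    (fun ans shift =>
      ((List.range (l.length - shift)).foldl (aBody l shift (l.length - shift)) ((0, 0), ans)).2)
    (0, 0, 0)
  [String.ofList ((l.drop ans.1).take ans.2.2), String.ofList ((l.drop ans.2.1).take ans.2.2)]

-- ===== PORT B =====
-- B's fresh extension from start `cur` with local mismatch counter `err`; returns the stop point.
def bScan (l : List Char) (shift stop cur : Nat) (err : Nat) : Nat :=
  if _h : cur < stop then
    if err < 1 ∨ l.getD cur ' ' = l.getD (cur + shift) ' ' then
      bScan l shift stop (cur + 1)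
        (if l.getD cur ' ' ≠ l.getD (cur + shift) ' ' then err + 1 else err)
    else cur
  else cur
termination_by stop - cur

def LongestRepeatWith1Mismath_alt (seq : String) : List String :=
  let l := seq.toList
  let n := l.length
  let best := (List.range' 1 (n - 1)).foldl
    (fun b shift =>
      (List.range (n - shift)).foldl
        (fun b i =>
          let len := bScan l shift (n - shift) i 0 - i
          if b.2.2 < len ∧ len ≤ shift then (i, i + shift, len) else b)
        b)
    (0, 0, 0)
  [String.ofList ((l.drop best.1).take best.2.2), String.ofList ((l.drop best.2.1).take best.2.2)]

-- ===== PRECONDITION & SPEC =====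
def Spec_LongestRepeatWith1Mismath (seq : String) (out : List String) : Prop := out = LongestRepeatWith1Mismath_alt seq
instance (seq : String) (out : List String) : Decidable (Spec_LongestRepeatWith1Mismath seq out) := by unfold Spec_LongestRepeatWith1Mismath; infer_instance

-- ===== CLAIM (what is proved, stated in full; the proofs are below) =====
def Claim_equal_LongestRepeatWith1Mismath : Prop := ∀ (seq : String), Dom_LongestRepeatWith1Mismath seq → Spec_LongestRepeatWith1Mismath seq (LongestRepeatWith1Mismath seq)

-- ===== LEMMAS AND PROOFS =====
-- `neq l shift k`: mismatch at position k; `mis l shift a b`: number of mismatches in [a, b).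
def neq (l : List Char) (shift k : Nat) : Bool := decide (l.getD k ' ' ≠ l.getD (k + shift) ' ')

def mis (l : List Char) (shift a b : Nat) : Nat := (List.range' a (b - a)).countP (neq l shift)

-- mismatch-window validity: every k in [i, c) satisfied the while-continuation condition w.r.t. start i
def valid (l : List Char) (shift i c : Nat) : Prop :=
  ∀ k, i ≤ k → k < c → (mis l shift i k = 0 ∨ neq l shift k = false)

theorem mis_self (l : List Char) (shift a : Nat) : mis l shift a a = 0 := by
  simp [mis]

theorem mis_succ_right (l : List Char) (shift a b : Nat) (h : a ≤ b) :
    mis l shift a (b + 1) = mis l shift a b + (if neq l shift b then 1 else 0) := by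
  have h1 : b + 1 - a = (b - a) + 1 := by omega
  have h2 : List.range' a ((b - a) + 1) = List.range' a (b - a) ++ [a + 1 * (b - a)] :=
    List.range'_concat
  rw [show a + 1 * (b - a) = b by omega] at h2
  simp [mis, h1, h2, List.countP_append, List.countP_cons]

theorem mis_succ_left (l : List Char) (shift i c : Nat) (h : i < c) :
    mis l shift i c = (if neq l shift i then 1 else 0) + mis l shift (i + 1) c := by
  have h1 : c - i = (c - (i + 1)) + 1 := by omega
  have h2 : List.range' i ((c - (i + 1)) + 1) = i :: List.range' (i + 1) (c - (i + 1)) :=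
    List.range'_succ ..
  simp [mis, h1, h2, List.countP_cons]
  cases hb : neq l shift i <;> simp
  omega

theorem mis_add (l : List Char) (shift a b c : Nat) (h1 : a ≤ b) (h2 : b ≤ c) :
    mis l shift a b + mis l shift b c = mis l shift a c := by
  have h3 : List.range' a (b - a) ++ List.range' (a + 1 * (b - a)) (c - b) =
      List.range' a ((b - a) + (c - b)) := List.range'_append
  rw [show a + 1 * (b - a) = b by omega, show (b - a) + (c - b) = c - a by omega] at h3
  simp [mis, ← h3, List.countP_append]

theorem bScan_ge (l : List Char) (shift stop : Nat) : ∀ cur err, cur ≤ bScan l shift stop cur err := by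
  intro cur err
  have hfuel : stop - cur ≤ stop - cur := le_refl _
  generalize hn : stop - cur = n at hfuel
  clear hfuel
  induction n generalizing cur err with
  | zero => rw [bScan]; simp only [dif_neg (show ¬ cur < stop by omega)]; omega
  | succ n ih =>
    rw [bScan]
    by_cases h : cur < stop
    · simp only [dif_pos h]
      by_cases hc : err < 1 ∨ l.getD cur ' ' = l.getD (cur + shift) ' '
      · rw [if_pos hc]
        have := ih (cur + 1) (if l.getD cur ' ' ≠ l.getD (cur + shift) ' ' then err + 1 else err)
          (by omega)
        omega
      · rw [if_neg hc]
    · simp only [dif_neg h]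
      omega

theorem bScan_le (l : List Char) (shift stop : Nat) :
    ∀ cur err, cur ≤ stop → bScan l shift stop cur err ≤ stop := by
  intro cur err hcur
  have hfuel : stop - cur ≤ stop - cur := le_refl _
  generalize hn : stop - cur = n at hfuel
  clear hfuel
  induction n generalizing cur err with
  | zero => rw [bScan]; simp only [dif_neg (show ¬ cur < stop by omega)]; omega
  | succ n ih =>
    rw [bScan]
    by_cases h : cur < stop
    · simp only [dif_pos h]
      by_cases hc : err < 1 ∨ l.getD cur ' ' = l.getD (cur + shift) ' '
      · rw [if_pos hc]
        exact ih (cur + 1) _ (by omega) (by omega)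
      · rw [if_neg hc]; omega
    · simp only [dif_neg h]; omega

-- A's while loop = B's scan plus a mismatch count, starting from equal error counts
theorem aWhile_eq_bScan (l : List Char) (shift stop : Nat) :
    ∀ cur (err : Nat),
      aWhile l shift stop cur (err : Int) =
        (bScan l shift stop cur err,
          (err : Int) + (mis l shift cur (bScan l shift stop cur err) : Int)) := by
  intro cur err
  have hfuel : stop - cur ≤ stop - cur := le_refl _
  generalize hn : stop - cur = n at hfuel
  clear hfuel
  induction n generalizing cur err with
  | zero =>
    have h : ¬ cur < stop := by omega
    rw [aWhile, bScan]
    simp [h, mis_self]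
  | succ n ih =>
    rw [aWhile, bScan]
    by_cases h : cur < stop
    · simp only [dif_pos h]
      have hcast : ((err : Int) < 1 ∨ l.getD cur ' ' = l.getD (cur + shift) ' ') ↔
          (err < 1 ∨ l.getD cur ' ' = l.getD (cur + shift) ' ') := by
        constructor <;> rintro (h1 | h2) <;> first | left; omega | right; assumption
      by_cases hc : err < 1 ∨ l.getD cur ' ' = l.getD (cur + shift) ' '
      · rw [if_pos (hcast.mpr hc), if_pos hc]
        by_cases hm : l.getD cur ' ' = l.getD (cur + shift) ' '
        · rw [if_neg (by simpa using hm), if_neg (by simpa using hm)]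
          rw [ih (cur + 1) err (by omega)]
          have hge : cur + 1 ≤ bScan l shift stop (cur + 1) err := bScan_ge ..
          have hsl := mis_succ_left l shift cur (bScan l shift stop (cur + 1) err) (by omega)
          rw [hsl]
          have hneq : neq l shift cur = false := by simpa [neq] using hm
          simp [hneq]
        · rw [if_pos (by simpa using hm), if_pos (by simpa using hm)]
          rw [show (err : Int) + 1 = ((err + 1 : Nat) : Int) by push_cast; ring]
          rw [ih (cur + 1) (err + 1) (by omega)]
          have hge : cur + 1 ≤ bScan l shift stop (cur + 1) (err + 1) := bScan_ge ..
          have hsl := mis_succ_left l shift cur (bScan l shift stop (cur + 1) (err + 1)) (by omega)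
          rw [hsl]
          have hneq : neq l shift cur = true := by simpa [neq] using hm
          simp only [hneq, if_true, Prod.mk.injEq, true_and]
          push_cast
          ring
      · rw [if_neg (by rw [hcast]; exact hc), if_neg hc]
        simp [mis_self]
    · simp [h, mis_self]

-- resumability: a valid window may be rescanned from its left end
theorem bScan_resume (l : List Char) (shift stop : Nat) (i : Nat) :
    ∀ a, i ≤ a → a ≤ stop → valid l shift i a →
      bScan l shift stop i 0 = bScan l shift stop a (mis l shift i a) := by
  have aux : ∀ d a, i ≤ a → a + d ≤ stop → valid l shift i (a + d) →
      bScan l shift stop a (mis l shift i a) = bScan l shift stop (a + d) (mis l shift i (a + d)) := by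
    intro d
    induction d with
    | zero => intro a _ _ _; rfl
    | succ d ih =>
      intro a ha hstop hv
      have hlt : a < stop := by omega
      have hval : mis l shift i a = 0 ∨ neq l shift a = false := hv a ha (by omega)
      have hstep : bScan l shift stop a (mis l shift i a) =
          bScan l shift stop (a + 1) (mis l shift i (a + 1)) := by
        rw [bScan]
        simp only [dif_pos hlt]
        have hcond : mis l shift i a < 1 ∨ l.getD a ' ' = l.getD (a + shift) ' ' := by
          rcases hval with h0 | hf
          · left; omega
          · right; simpa [neq] using hf
        rw [if_pos hcond]
        congr 1
        rw [mis_succ_right l shift i a ha]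
        cases hb : neq l shift a <;> simp [neq] at hb <;> simp [hb]
      rw [hstep]
      have := ih (a + 1) (by omega) (by omega) (by rwa [show a + 1 + d = a + (d + 1) by omega])
      rwa [show a + 1 + d = a + (d + 1) by omega] at this
  intro a ha hstop hv
  have := aux (a - i) i (le_refl i) (by omega) (by rwa [show i + (a - i) = a by omega])
  rw [mis_self] at this
  rwa [show i + (a - i) = a by omega] at this

-- the window produced by a scan over a valid window is valid
theorem bScan_valid (l : List Char) (shift stop : Nat) (i : Nat) :
    ∀ a, i ≤ a → valid l shift i a →
      valid l shift i (bScan l shift stop a (mis l shift i a)) := by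
  intro a ha hv
  have hfuel : stop - a ≤ stop - a := le_refl _
  generalize hn : stop - a = n at hfuel
  clear hfuel
  induction n generalizing a with
  | zero =>
    rw [bScan]
    simp only [dif_neg (show ¬ a < stop by omega)]
    exact hv
  | succ n ih =>
    rw [bScan]
    by_cases h : a < stop
    · simp only [dif_pos h]
      by_cases hc : mis l shift i a < 1 ∨ l.getD a ' ' = l.getD (a + shift) ' '
      · rw [if_pos hc]
        have hv' : valid l shift i (a + 1) := by
          intro k hk1 hk2
          by_cases hka : k < a
          · exact hv k hk1 hka
          · have : k = a := by omega
            subst this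
            rcases hc with h0 | he
            · left; omega
            · right
              simp only [neq, decide_eq_false_iff_not, ne_eq, not_not]
              exact he
        have herr : (if l.getD a ' ' ≠ l.getD (a + shift) ' ' then mis l shift i a + 1
            else mis l shift i a) = mis l shift i (a + 1) := by
          rw [mis_succ_right l shift i a ha]
          cases hb : neq l shift a <;> simp [neq] at hb <;> simp [hb]
        rw [herr]
        exact ih (a + 1) (by omega) hv' (by omega)
      · rw [if_neg hc]
        exact hv
    · simp only [dif_neg h]
      exact hv

theorem valid_shrink (l : List Char) (shift i c : Nat) (h : valid l shift i c) :
    valid l shift (i + 1) c := by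
  intro k hk1 hk2
  rcases h k (by omega) hk2 with h0 | hf
  · left
    have := mis_succ_left l shift i k (by omega)
    omega
  · right; exact hf

theorem bScan_gt (l : List Char) (shift stop i : Nat) (h : i < stop) :
    i < bScan l shift stop i 0 := by
  rw [bScan]
  simp only [dif_pos h, if_pos (Or.inl (by omega : (0 : Nat) < 1))]
  have := bScan_ge l shift stop (i + 1) (if l.getD i ' ' ≠ l.getD (i + shift) ' ' then 0 + 1 else 0)
  omega

-- inner loop equality, by induction on the remaining index range
theorem inner_eq (l : List Char) (shift stop : Nat) (hs : 1 ≤ shift) :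
    ∀ k i cur ans, i + k = stop → i ≤ cur → cur ≤ stop → valid l shift i cur →
      ((List.range' i k).foldl (aBody l shift stop) ((cur, (mis l shift i cur : Int)), ans)).2 =
        (List.range' i k).foldl
          (fun b i =>
            if b.2.2 < bScan l shift stop i 0 - i ∧ bScan l shift stop i 0 - i ≤ shift then
              (i, i + shift, bScan l shift stop i 0 - i)
            else b)
          ans := by
  intro k
  induction k with
  | zero => intro i cur ans _ _ _ _; rfl
  | succ k ih =>
    intro i cur ans hik hicur hcurstop hv
    rw [List.range'_succ, List.foldl_cons, List.foldl_cons]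
    have hres : bScan l shift stop i 0 = bScan l shift stop cur (mis l shift i cur) :=
      bScan_resume l shift stop i cur hicur hcurstop hv
    have hiltstop : i < stop := by omega
    have hiE : i < bScan l shift stop i 0 := bScan_gt l shift stop i hiltstop
    have hcurE : cur ≤ bScan l shift stop i 0 := by rw [hres]; exact bScan_ge ..
    have hEstop : bScan l shift stop i 0 ≤ stop := by
      rw [hres]; exact bScan_le l shift stop cur _ hcurstop
    have hvE : valid l shift i (bScan l shift stop i 0) := by
      rw [hres]; exact bScan_valid l shift stop i cur hicur hv
    have hstep : aBody l shift stop ((cur, (mis l shift i cur : Int)), ans) i =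
        ((bScan l shift stop i 0, (mis l shift (i + 1) (bScan l shift stop i 0) : Int)),
          if ans.2.2 < bScan l shift stop i 0 - i ∧ bScan l shift stop i 0 - i ≤ shift then
            (i, i + shift, bScan l shift stop i 0 - i)
          else ans) := by
      unfold aBody
      rw [aWhile_eq_bScan l shift stop cur (mis l shift i cur)]
      rw [← hres]
      dsimp only
      have hadd : mis l shift i cur + mis l shift cur (bScan l shift stop i 0) =
          mis l shift i (bScan l shift stop i 0) := mis_add l shift i cur _ hicur hcurE
      have hmm := mis_succ_left l shift i (bScan l shift stop i 0) hiE
      have hcond : ((bScan l shift stop i 0 : Int) - i > (ans.2.2 : Int) ∧ i ≠ i + shift ∧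
            (i : Int) + ((bScan l shift stop i 0 : Int) - i) - 1 < (i : Int) + shift) ↔
          (ans.2.2 < bScan l shift stop i 0 - i ∧ bScan l shift stop i 0 - i ≤ shift) := by
        omega
      rw [if_congr hcond rfl rfl]
      have he' : (if l.getD i ' ' ≠ l.getD (i + shift) ' ' then
            ((mis l shift i cur : Int) + (mis l shift cur (bScan l shift stop i 0) : Int)) - 1
          else (mis l shift i cur : Int) + (mis l shift cur (bScan l shift stop i 0) : Int)) =
          (mis l shift (i + 1) (bScan l shift stop i 0) : Int) := by
        by_cases hni : l.getD i ' ' = l.getD (i + shift) ' '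
        · rw [if_neg (by simpa using hni)]
          have hneq : neq l shift i = false := by simpa [neq] using hni
          rw [hneq] at hmm
          simp only [Bool.false_eq_true, if_false, Nat.zero_add] at hmm
          omega
        · rw [if_pos (by simpa using hni)]
          have hneq : neq l shift i = true := by simpa [neq] using hni
          rw [hneq] at hmm
          simp only [if_true] at hmm
          omega
      rw [he']
    rw [hstep]
    exact ih (i + 1) (bScan l shift stop i 0)
      (if ans.2.2 < bScan l shift stop i 0 - i ∧ bScan l shift stop i 0 - i ≤ shift then
        (i, i + shift, bScan l shift stop i 0 - i) else ans)
      (by omega) (by omega) hEstop (valid_shrink l shift i _ hvE)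

-- the inner loop started from the reset state, over `List.range stop`
theorem inner_eq0 (l : List Char) (shift stop : Nat) (hs : 1 ≤ shift) (ans : Nat × Nat × Nat) :
    ((List.range stop).foldl (aBody l shift stop) ((0, (0 : Int)), ans)).2 =
      (List.range stop).foldl
        (fun b i =>
          if b.2.2 < bScan l shift stop i 0 - i ∧ bScan l shift stop i 0 - i ≤ shift then
            (i, i + shift, bScan l shift stop i 0 - i)
          else b)
        ans := by
  have := inner_eq l shift stop hs stop 0 0 ans (by omega) (le_refl 0) (by omega)
    (fun k h1 h2 => absurd h2 (by omega))
  rw [mis_self] at this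
  simpa [List.range_eq_range'] using this

-- the outer fold over shifts
theorem outer_eq (l : List Char) :
    ∀ m s ans, 1 ≤ s →
      (List.range' s m).foldl
        (fun ans shift =>
          ((List.range (l.length - shift)).foldl (aBody l shift (l.length - shift))
            ((0, (0 : Int)), ans)).2)
        ans =
      (List.range' s m).foldl
        (fun b shift =>
          (List.range (l.length - shift)).foldl
            (fun b i =>
              if b.2.2 < bScan l shift (l.length - shift) i 0 - i ∧
                  bScan l shift (l.length - shift) i 0 - i ≤ shift then
                (i, i + shift, bScan l shift (l.length - shift) i 0 - i)
              else b)
            b)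
        ans := by
  intro m
  induction m with
  | zero => intro s ans _; rfl
  | succ m ih =>
    intro s ans hs
    rw [List.range'_succ, List.foldl_cons, List.foldl_cons]
    rw [inner_eq0 l s (l.length - s) hs ans]
    exact ih (s + 1) _ (by omega)

-- ===== VERDICT (by name: the statement is the Claim_ definition above) =====
theorem LongestRepeatWith1Mismath_spec : Claim_equal_LongestRepeatWith1Mismath := by
  intro seq _
  unfold Spec_LongestRepeatWith1Mismath LongestRepeatWith1Mismath LongestRepeatWith1Mismath_alt
  dsimp only
  rw [outer_eq seq.toList (seq.toList.length - 1) 1 (0, 0, 0) (le_refl 1)]
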